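-- pv_equiv track=rewrite | github.com/webutan/lain | bot.py | is_noun
-- ===== SOURCE A (Python) =====
-- def is_noun(senses):
--     """Check if any sense indicates this is a noun"""
--     noun_types = [
--         'Noun', 'Noun - used as a suffix', 'Noun - used as a prefix',
--         'Noun, used as a suffix', 'Noun, used as a prefix',
--         'Proper noun', 'Pronoun', 'Adverbial noun', 'Temporal noun',
--         'Noun or verb acting prenominally', 'Noun which may take the genitive case particle \'no\'',
--         'Suru verb - included', 'Noun, Adverbial'
--     ]
--     for sense in senses:
--         parts = sense.get('parts_of_speech', [])
--         for part in parts: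
--             for noun_type in noun_types:
--                 if noun_type.lower() in part.lower():
--                     return True
--     return False
-- ===== SOURCE B (Python) =====
-- def is_noun(senses):
--     """Check if any sense indicates this is a noun"""
--     # Concatenate all lowered parts-of-speech into one '\n'-separated string and
--     # run two substring searches on it.  Correct because no needle contains '\n'
--     # (so a match cannot span a part boundary), and every entry of A's 13-entry
--     # table except 'Suru verb - included' contains 'noun' while 'Noun' itself is
--     # in the table, so the table scan reduces to exactly these two needles.
--     text = "\n".join(
--         part.lower()
--         for sense in senses
--         for part in sense.get('parts_of_speech', [])
--     )
--     return 'noun' in text or 'suru verb - included' in text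
-- ===== Notes on version B (the rewrite author's own statement) =====
-- stated objective: alternative
-- what changed: Instead of three nested early-exit loops over senses, parts and a 13-entry keyword table, B flattens all lowered parts into one newline-joined string and performs two substring searches on it ('noun' and 'suru verb - included'), which subsume the table exactly and cannot match across the separator.
import Mathlib
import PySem

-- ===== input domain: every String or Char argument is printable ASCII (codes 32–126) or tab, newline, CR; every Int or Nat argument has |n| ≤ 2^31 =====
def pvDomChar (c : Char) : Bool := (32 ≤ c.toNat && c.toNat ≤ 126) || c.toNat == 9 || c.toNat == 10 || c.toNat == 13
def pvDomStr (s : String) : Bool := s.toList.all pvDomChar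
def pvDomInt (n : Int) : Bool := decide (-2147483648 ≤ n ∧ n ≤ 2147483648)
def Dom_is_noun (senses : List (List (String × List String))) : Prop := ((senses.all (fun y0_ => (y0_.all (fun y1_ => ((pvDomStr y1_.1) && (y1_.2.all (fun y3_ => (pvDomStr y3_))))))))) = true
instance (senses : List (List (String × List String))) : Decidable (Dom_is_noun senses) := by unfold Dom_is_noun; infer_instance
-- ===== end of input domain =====

-- B flattens all lowered parts-of-speech into one '\n'-joined string and runs two
-- substring searches on it ('noun', 'suru verb - included'), which subsume A's
-- 13-entry table exactly; an alternative single-string algorithm of similar cost.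


-- ===== PORT A =====
def pv_noun_types : List String :=
  ["Noun", "Noun - used as a suffix", "Noun - used as a prefix",
   "Noun, used as a suffix", "Noun, used as a prefix",
   "Proper noun", "Pronoun", "Adverbial noun", "Temporal noun",
   "Noun or verb acting prenominally", "Noun which may take the genitive case particle 'no'",
   "Suru verb - included", "Noun, Adverbial"]

def is_noun (senses : List (List (String × List String))) : Bool :=
  senses.any (fun sense =>
    (PySem.Dict.getD (PySem.Dict.mk sense) "parts_of_speech" []).any (fun part =>
      pv_noun_types.any (fun noun_type =>
        PySem.Str.isIn (PySem.Str.lower noun_type) (PySem.Str.lower part))))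

-- ===== PORT B =====
-- the 'text' variable of Source B
def pv_text (senses : List (List (String × List String))) : String :=
  PySem.Str.join "\n"
    (senses.flatMap (fun sense =>
      (PySem.Dict.getD (PySem.Dict.mk sense) "parts_of_speech" []).map
        (fun part => PySem.Str.lower part)))

def is_noun_alt (senses : List (List (String × List String))) : Bool :=
  PySem.Str.isIn "noun" (pv_text senses) || PySem.Str.isIn "suru verb - included" (pv_text senses)

-- ===== PRECONDITION & SPEC =====
def Spec_is_noun (senses : List (List (String × List String))) (out : Bool) : Prop := out = is_noun_alt senses
instance (senses : List (List (String × List String))) (out : Bool) : Decidable (Spec_is_noun senses out) := by unfold Spec_is_noun; infer_instance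

-- ===== CLAIM (what is proved, stated in full; the proofs are below) =====
def Claim_equal_is_noun : Prop := ∀ (senses : List (List (String × List String))), Dom_is_noun senses → Spec_is_noun senses (is_noun senses)

-- ===== LEMMAS AND PROOFS =====

-- A needle not containing c is never a prefix across a ++ c :: b beyond a.
theorem pv_prefix_append_cons {α : Type} {n a b : List α} {c : α}
    (hc : c ∉ n) (h : n <+: a ++ c :: b) : n <+: a := by
  induction n generalizing a with
  | nil => exact List.nil_prefix
  | cons y n' ih =>
    cases a with
    | nil =>
      rcases h with ⟨t, ht⟩
      simp only [List.nil_append, List.cons_append, List.cons.injEq] at ht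
      exact absurd (by simp [ht.1]) hc
    | cons z a' =>
      rcases h with ⟨t, ht⟩
      simp only [List.cons_append, List.cons.injEq] at ht
      rcases ht with ⟨rfl, ht2⟩
      have h' : n' <+: a' ++ c :: b := ⟨t, ht2⟩
      exact List.cons_prefix_cons.mpr
        ⟨rfl, ih (fun hm => hc (List.mem_cons_of_mem _ hm)) h'⟩

-- A needle not containing c occurs in a ++ c :: b iff it occurs in a or in b.
theorem pv_infix_append_cons {α : Type} {n : List α} {c : α} (hc : c ∉ n) :
    ∀ (a b : List α), n <:+: a ++ c :: b ↔ (n <:+: a ∨ n <:+: b) := by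
  intro a b
  induction a with
  | nil =>
    simp only [List.nil_append, List.infix_cons_iff]
    constructor
    · rintro (h | h)
      · cases n with
        | nil => exact Or.inl List.nil_infix
        | cons y n' =>
          rcases h with ⟨t, ht⟩
          simp only [List.cons_append, List.cons.injEq] at ht
          exact absurd (by simp [ht.1]) hc
      · exact Or.inr h
    · rintro (h | h)
      · have : n = [] := List.eq_nil_of_infix_nil h
        subst this; exact Or.inl List.nil_prefix
      · exact Or.inr h
  | cons z a' ih =>
    simp only [List.cons_append, List.infix_cons_iff, ih]
    constructor
    · rintro (h | h | h)
      · exact Or.inl (Or.inl (pv_prefix_append_cons hc (by simpa using h)))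
      · exact Or.inl (Or.inr h)
      · exact Or.inr h
    · rintro ((h | h) | h)
      · exact Or.inl (h.trans (List.prefix_append (z :: a') (c :: b)))
      · exact Or.inr (Or.inl h)
      · exact Or.inr (Or.inr h)

-- A '\n'-free nonempty needle occurs in the '\n'-join iff it occurs in some piece.
theorem pv_infix_join {n : List Char} (hne : n ≠ []) (hc : '\n' ∉ n) :
    ∀ (L : List (List Char)),
      (n <:+: PySem.Chars.join ['\n'] L ↔ ∃ x ∈ L, n <:+: x) := by
  intro L
  induction L with
  | nil =>
    simp only [PySem.Chars.join_nil]
    constructor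
    · intro h; exact absurd (List.eq_nil_of_infix_nil h) hne
    · rintro ⟨x, hx, _⟩; exact absurd hx List.not_mem_nil
  | cons x rest ih =>
    cases rest with
    | nil =>
      simp [PySem.Chars.join_singleton]
    | cons y rest' =>
      rw [PySem.Chars.join_cons_cons, List.append_assoc]
      have hstep : (['\n'] : List Char) ++ PySem.Chars.join ['\n'] (y :: rest') =
          '\n' :: PySem.Chars.join ['\n'] (y :: rest') := rfl
      rw [hstep, pv_infix_append_cons hc, ih]
      constructor
      · rintro (h | ⟨z, hz, hzn⟩)
        · exact ⟨x, List.mem_cons_self, h⟩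
        · exact ⟨z, List.mem_cons_of_mem _ hz, hzn⟩
      · rintro ⟨z, hz, hzn⟩
        rcases List.mem_cons.mp hz with rfl | hz'
        · exact Or.inl hzn
        · exact Or.inr ⟨z, hz', hzn⟩

-- Every lowered table entry either contains "noun" or is "suru verb - included",
-- so A's table scan on one part equals the two direct needle tests.
theorem pv_part_eq (part : String) :
    pv_noun_types.any (fun noun_type =>
      PySem.Str.isIn (PySem.Str.lower noun_type) (PySem.Str.lower part)) =
    (PySem.Str.isIn "noun" (PySem.Str.lower part)
      || PySem.Str.isIn "suru verb - included" (PySem.Str.lower part)) := by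
  rw [Bool.eq_iff_iff]
  simp only [pv_noun_types, List.any_cons, List.any_nil, Bool.or_eq_true,
    PySem.Str.isIn_iff_infix]
  constructor
  · rintro (h|h|h|h|h|h|h|h|h|h|h|h|h|h)
    all_goals first
      | exact absurd h (by decide)
      | (left; exact List.IsInfix.trans (by decide) h)
      | (right; exact List.IsInfix.trans (by decide) h)
  · rintro (h|h)
    · left; exact List.IsInfix.trans (by decide) h
    · right; right; right; right; right; right; right; right; right; right; right; left
      exact List.IsInfix.trans (by decide) h

-- B's needle test on the joined text equals a scan of the flattened lowered parts.
theorem pv_isIn_text (senses : List (List (String × List String))) (needle : String)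
    (hne : needle.toList ≠ []) (hc : '\n' ∉ needle.toList) :
    PySem.Str.isIn needle (pv_text senses) =
    senses.any (fun sense =>
      (PySem.Dict.getD (PySem.Dict.mk sense) "parts_of_speech" []).any
        (fun part => PySem.Str.isIn needle (PySem.Str.lower part))) := by
  rw [Bool.eq_iff_iff]
  unfold pv_text
  rw [PySem.Str.isIn_iff_infix, PySem.Str.toList_join]
  have hsep : ("\n" : String).toList = ['\n'] := rfl
  rw [hsep, pv_infix_join hne hc]
  simp only [List.any_eq_true, List.mem_map, List.mem_flatMap, PySem.Str.isIn_iff_infix]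
  aesop

-- ===== VERDICT (by name: the statement is the Claim_ definition above) =====
theorem is_noun_spec : Claim_equal_is_noun := by
  intro senses _
  unfold Spec_is_noun is_noun is_noun_alt
  rw [pv_isIn_text senses "noun" (by decide) (by decide),
      pv_isIn_text senses "suru verb - included" (by decide) (by decide)]
  simp only [pv_part_eq]
  rw [Bool.eq_iff_iff]
  simp only [List.any_eq_true, Bool.or_eq_true]
  aesop
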